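-- pv_equiv track=rewrite | github.com/dengguojie/vue-element-admin | auto_schedule/python/tbe/dsl/unify_schedule/reduce_tilingcase.py | find_last_reduce_axis
-- ===== SOURCE A (Python) =====
-- from typing import Iterable
--
-- def find_last_reduce_axis(shape, reduce_axis_indexes: Iterable[int]):
--     # shape_before_reduce:(ak+1,rk,...,r2,a2,r1,a1) or (ak,rk,...,r2,a1,r1)
--     # find r1 position, r1 may contain continues axis
--     r1_end_index = None
--     for i in range(len(shape) - 1, -1, -1):
--         if i in reduce_axis_indexes:
--             r1_end_index = i
--             break
--     r1_start_index = r1_end_index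
--     if r1_end_index is None:
--         return r1_start_index, r1_end_index
--     for i in range(r1_end_index, -1, -1):
--         if i not in reduce_axis_indexes:
--             r1_start_index = i + 1
--             break
--         if i == 0:
--             r1_start_index = i
--
--     return r1_start_index, r1_end_index
-- ===== SOURCE B (Python) =====
-- def find_last_reduce_axis(shape, reduce_axis_indexes):
--     # sort the distinct in-range reduce indices once, then walk the descending list
--     vals = sorted({i for i in reduce_axis_indexes if 0 <= i < len(shape)})
--     if not vals:
--         return None, None
--     desc = vals[::-1]
--     r1_end = desc[0]
--     r1_start = r1_end
--     for v in desc[1:]: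
--         if v == r1_start - 1:
--             r1_start = v
--         else:
--             break
--     return r1_start, r1_end
-- ===== Notes on version B (the rewrite author's own statement) =====
-- stated objective: faster
-- what changed: Instead of scanning shape's whole index range top-down twice with a linear 'i in reduce_axis_indexes' membership test at every step, B builds the sorted set of distinct in-range reduce indices once and walks that descending list while consecutive entries are contiguous.
import Mathlib
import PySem

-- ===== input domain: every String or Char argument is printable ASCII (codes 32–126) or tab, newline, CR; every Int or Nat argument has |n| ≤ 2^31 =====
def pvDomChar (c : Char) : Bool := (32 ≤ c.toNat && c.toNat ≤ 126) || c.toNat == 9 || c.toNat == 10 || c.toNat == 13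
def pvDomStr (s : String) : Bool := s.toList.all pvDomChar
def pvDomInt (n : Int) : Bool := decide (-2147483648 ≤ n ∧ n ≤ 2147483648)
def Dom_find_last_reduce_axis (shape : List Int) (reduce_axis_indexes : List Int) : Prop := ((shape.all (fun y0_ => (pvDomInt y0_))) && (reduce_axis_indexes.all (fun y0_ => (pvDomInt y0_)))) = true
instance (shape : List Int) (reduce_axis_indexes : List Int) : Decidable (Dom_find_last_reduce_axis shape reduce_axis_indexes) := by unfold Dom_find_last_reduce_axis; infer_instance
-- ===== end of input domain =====

-- B sorts the deduped in-range reduce indices once and walks the descending list,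
-- instead of A's two top-down scans with per-step list membership tests (objective: faster; measured).


-- ===== PORT A =====
-- first loop: for i in range(len(shape)-1,-1,-1): if i in R: return i (break)
def aLoop1 (R : List Int) (i : Int) : Option Int :=
  if i < 0 then none
  else if i ∈ R then some i
  else aLoop1 R (i - 1)
termination_by (i + 1).toNat
decreasing_by omega

-- second loop: for i in range(e,-1,-1): if i not in R: start=i+1; break; if i==0: start=i
def aLoop2 (R : List Int) (start i : Int) : Int :=
  if i < 0 then start
  else if i ∉ R then i + 1
  else if i = 0 then aLoop2 R i (i - 1)
  else aLoop2 R start (i - 1)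
termination_by (i + 1).toNat
decreasing_by all_goals omega

def find_last_reduce_axis (shape : List Int) (reduce_axis_indexes : List Int) : Option Int × Option Int :=
  match aLoop1 reduce_axis_indexes ((shape.length : Int) - 1) with
  | none => (none, none)
  | some e => (some (aLoop2 reduce_axis_indexes e e), some e)

-- ===== PORT B =====
-- walk the descending list while consecutive entries are contiguous
def altWalk (cur : Int) : List Int → Int
  | [] => cur
  | v :: t => if v = cur - 1 then altWalk v t else cur

def find_last_reduce_axis_alt (shape : List Int) (reduce_axis_indexes : List Int) : Option Int × Option Int :=
  let vals := PySem.List.sorted (PySem.Set.ofList (reduce_axis_indexes.filter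
    (fun i => decide (0 ≤ i) && decide (i < (shape.length : Int))))) (fun x => x) false
  match vals.reverse with
  | [] => (none, none)
  | e :: rest => (some (altWalk e rest), some e)

-- ===== PRECONDITION & SPEC =====
def Spec_find_last_reduce_axis (shape : List Int) (reduce_axis_indexes : List Int) (out : Option Int × Option Int) : Prop := out = find_last_reduce_axis_alt shape reduce_axis_indexes
instance (shape : List Int) (reduce_axis_indexes : List Int) (out : Option Int × Option Int) : Decidable (Spec_find_last_reduce_axis shape reduce_axis_indexes out) := by unfold Spec_find_last_reduce_axis; infer_instance

-- ===== CLAIM (what is proved, stated in full; the proofs are below) =====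
def Claim_equal_find_last_reduce_axis : Prop := ∀ (shape : List Int) (reduce_axis_indexes : List Int), Dom_find_last_reduce_axis shape reduce_axis_indexes → Spec_find_last_reduce_axis shape reduce_axis_indexes (find_last_reduce_axis shape reduce_axis_indexes)

-- ===== LEMMAS AND PROOFS =====

-- abbreviation used by the proofs only
def pvVals (shape R : List Int) : List Int :=
  PySem.List.sorted (PySem.Set.ofList (R.filter
    (fun i => decide (0 ≤ i) && decide (i < (shape.length : Int))))) (fun x => x) false

theorem mem_pvVals (shape R : List Int) (x : Int) :
    x ∈ pvVals shape R ↔ (x ∈ R ∧ 0 ≤ x ∧ x < (shape.length : Int)) := by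
  unfold pvVals
  rw [PySem.List.mem_sorted, PySem.Set.mem_ofList, List.mem_filter]
  simp

theorem pairwise_pvVals (shape R : List Int) : (pvVals shape R).Pairwise (· < ·) :=
  PySem.List.sorted_ofList_pairwise_lt _

-- A's first loop finds `e` when it is the greatest in-range member of R up to i
theorem loop1_some (R : List Int) (e : Int) (he : e ∈ R) (h0 : 0 ≤ e) :
    ∀ (k : Nat) (i : Int), i = e + k → (∀ j, e < j → j ≤ i → j ∉ R) →
      aLoop1 R i = some e := by
  intro k
  induction k with
  | zero =>
    intro i hik _
    have hie : i = e := by omega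
    subst hie
    rw [aLoop1, if_neg (by omega), if_pos he]
  | succ m ih =>
    intro i hik hno
    have h2 : i ∉ R := hno i (by omega) (by omega)
    rw [aLoop1, if_neg (by omega), if_neg h2]
    exact ih (i - 1) (by omega) (fun j hj hji => hno j hj (by omega))

theorem loop1_none (R : List Int) :
    ∀ (k : Nat) (i : Int), i < k → (∀ j, 0 ≤ j → j ≤ i → j ∉ R) → aLoop1 R i = none := by
  intro k
  induction k with
  | zero => intro i hi _; rw [aLoop1, if_pos (by omega)]
  | succ m ih =>
    intro i hi hno
    by_cases h : i < 0
    · rw [aLoop1, if_pos h]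
    · have h2 : i ∉ R := hno i (by omega) le_rfl
      rw [aLoop1, if_neg h, if_neg h2]
      exact ih (i - 1) (by omega) (fun j hj hji => hno j hj (by omega))

-- the common characterisation of the start index of the contiguous block ending at e
def GoodS (shape R : List Int) (e s : Int) : Prop :=
  s ≤ e ∧ (∀ j, s ≤ j → j ≤ e → j ∈ pvVals shape R) ∧ (s - 1) ∉ pvVals shape R

theorem GoodS_unique (shape R : List Int) (e s s' : Int)
    (h : GoodS shape R e s) (h' : GoodS shape R e s') : s = s' := by
  obtain ⟨hs, hall, hnot⟩ := h
  obtain ⟨hs', hall', hnot'⟩ := h'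
  by_contra hne
  rcases lt_or_gt_of_ne hne with hlt | hgt
  · exact hnot' (hall (s' - 1) (by omega) (by omega))
  · exact hnot (hall' (s - 1) (by omega) (by omega))

-- A's second loop yields a GoodS value
theorem loop2_good (shape R : List Int) (e : Int)
    (he : e ∈ pvVals shape R) :
    ∀ (k : Nat) (i s0 : Int), i = (k : Int) → i ≤ e →
      (∀ j, i < j → j ≤ e → j ∈ pvVals shape R) →
      GoodS shape R e (aLoop2 R s0 i) := by
  have hmem := mem_pvVals shape R
  intro k
  induction k with
  | zero =>
    intro i s0 hik hie habove
    have hi0 : i = 0 := by omega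
    subst hi0
    have hen : (shape.length : Int) > e := by
      have := ((hmem e).1 he).2.2; omega
    by_cases hiR : (0:Int) ∈ R
    · have hiv : (0:Int) ∈ pvVals shape R := (hmem 0).2 ⟨hiR, le_rfl, by omega⟩
      rw [aLoop2, if_neg (by omega : ¬ (0:Int) < 0), if_neg (not_not_intro hiR), if_pos rfl,
          aLoop2, if_pos (by omega : (0:Int) - 1 < 0)]
      refine ⟨hie, ?_, ?_⟩
      · intro j hj1 hj2
        rcases eq_or_lt_of_le hj1 with h | h
        · exact h ▸ hiv
        · exact habove j h hj2
      · intro hc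
        have := ((hmem (0 - 1)).1 hc).2.1
        omega
    · rw [aLoop2, if_neg (by omega : ¬ (0:Int) < 0), if_pos hiR]
      have hine : (0:Int) ≠ e := fun h => hiR ((hmem 0).1 (by rw [h]; exact he)).1
      refine ⟨by omega, ?_, ?_⟩
      · intro j hj1 hj2; exact habove j (by omega) hj2
      · intro hc
        have := (hmem (0 + 1 - 1)).1 hc
        simp only [add_sub_cancel_right] at this
        exact hiR this.1
  | succ m ih =>
    intro i s0 hik hie habove
    by_cases hiR : i ∈ R
    · have hiv : i ∈ pvVals shape R := by
        have hlt : i < (shape.length : Int) := by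
          have := ((hmem e).1 he).2.2; omega
        exact (hmem i).2 ⟨hiR, by omega, hlt⟩
      rw [aLoop2, if_neg (by omega : ¬ i < 0), if_neg (not_not_intro hiR),
          if_neg (by omega : ¬ i = 0)]
      exact ih (i - 1) s0 (by omega) (by omega)
        (fun j hj1 hj2 => by
          rcases eq_or_lt_of_le (show i ≤ j by omega) with h | h
          · exact h ▸ hiv
          · exact habove j h hj2)
    · rw [aLoop2, if_neg (by omega : ¬ i < 0), if_pos hiR]
      have hine : i ≠ e := fun h => hiR ((hmem i).1 (by rw [h]; exact he)).1
      refine ⟨by omega, ?_, ?_⟩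
      · intro j hj1 hj2; exact habove j (by omega) hj2
      · intro hc
        have := (hmem (i + 1 - 1)).1 hc
        simp only [add_sub_cancel_right] at this
        exact hiR this.1

-- B's walk yields a GoodS value
theorem walk_good (shape R : List Int) (e : Int) :
    ∀ (d : List Int) (cur : Int), cur ≤ e →
      (∀ j, cur ≤ j → j ≤ e → j ∈ pvVals shape R) →
      (∀ x ∈ d, x ∈ pvVals shape R ∧ x < cur) →
      d.Pairwise (fun a b => b < a) →
      (∀ x, x ∈ pvVals shape R → x < cur → x ∈ d) →
      GoodS shape R e (altWalk cur d) := by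
  intro d
  induction d with
  | nil =>
    intro cur hce hint _ _ hbelow
    simp only [altWalk]
    refine ⟨hce, hint, fun hc => ?_⟩
    exact absurd (hbelow _ hc (by omega)) (List.not_mem_nil)
  | cons v t ih =>
    intro cur hce hint hmem hpw hbelow
    simp only [altWalk]
    by_cases hv : v = cur - 1
    · rw [if_pos hv, hv]
      have hvv := hmem v (by simp)
      have hpw' := List.pairwise_cons.1 hpw
      exact ih (cur - 1) (by omega)
        (fun j hj1 hj2 => by
          rcases eq_or_lt_of_le hj1 with h | h
          · exact h ▸ (hv ▸ hvv.1)
          · exact hint j (by omega) hj2)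
        (fun x hx => ⟨(hmem x (by simp [hx])).1, by
          have := hpw'.1 x hx; omega⟩)
        hpw'.2
        (fun x hx hxc => by
          have : x ∈ v :: t := hbelow x hx (by omega)
          rcases List.mem_cons.1 this with h | h
          · omega
          · exact h)
    · simp only [if_neg hv]
      refine ⟨hce, hint, fun hc => ?_⟩
      have : cur - 1 ∈ v :: t := hbelow _ hc (by omega)
      rcases List.mem_cons.1 this with h | h
      · exact hv h.symm
      · have hpw' := List.pairwise_cons.1 hpw
        have hvc : v < cur := (hmem v (by simp)).2
        have := hpw'.1 _ h
        omega

theorem reverse_pairwise_gt (shape R : List Int) :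
    ((pvVals shape R).reverse).Pairwise (fun a b => b < a) := by
  rw [List.pairwise_reverse]
  exact pairwise_pvVals shape R

-- ===== VERDICT (by name: the statement is the Claim_ definition above) =====
theorem find_last_reduce_axis_spec : Claim_equal_find_last_reduce_axis := by
  intro shape R _
  unfold Spec_find_last_reduce_axis find_last_reduce_axis find_last_reduce_axis_alt
  have hmem := mem_pvVals shape R
  have hrev := reverse_pairwise_gt shape R
  show (match aLoop1 R ((shape.length : Int) - 1) with
        | none => (none, none)
        | some e => (some (aLoop2 R e e), some e)) =
       (match (pvVals shape R).reverse with
        | [] => ((none : Option Int), (none : Option Int))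
        | e :: rest => (some (altWalk e rest), some e))
  cases hcase : (pvVals shape R).reverse with
  | nil =>
    have hempty : pvVals shape R = [] := by
      have := congrArg List.reverse hcase; simpa using this
    have h1 : aLoop1 R ((shape.length : Int) - 1) = none := by
      apply loop1_none R (shape.length)
      · omega
      · intro j hj0 hji hjR
        have : j ∈ pvVals shape R := (hmem j).2 ⟨hjR, hj0, by omega⟩
        rw [hempty] at this
        exact List.not_mem_nil this
    rw [h1]
  | cons e rest =>
    have heV : e ∈ pvVals shape R := by
      rw [← List.mem_reverse, hcase]; simp
    have hemax : ∀ x ∈ pvVals shape R, x ≤ e := by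
      intro x hx
      rw [← List.mem_reverse, hcase] at hx
      rcases List.mem_cons.1 hx with h | h
      · omega
      · rw [hcase] at hrev
        have := (List.pairwise_cons.1 hrev).1 x h
        omega
    obtain ⟨heR, he0, hen⟩ := (hmem e).1 heV
    have h1 : aLoop1 R ((shape.length : Int) - 1) = some e := by
      apply loop1_some R e heR he0 ((shape.length : Int) - 1 - e).toNat
      · omega
      · intro j hj1 hj2 hjR
        have : j ∈ pvVals shape R := (hmem j).2 ⟨hjR, by omega, by omega⟩
        have := hemax j this
        omega
    rw [h1]
    show (some (aLoop2 R e e), some e) = (some (altWalk e rest), some e)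
    have hA : GoodS shape R e (aLoop2 R e e) := by
      apply loop2_good shape R e heV e.toNat
      · omega
      · omega
      · intro j hj1 hj2; omega
    have hB : GoodS shape R e (altWalk e rest) := by
      rw [hcase] at hrev
      have hpw := List.pairwise_cons.1 hrev
      apply walk_good shape R e rest e le_rfl
      · intro j hj1 hj2
        have : j = e := by omega
        exact this ▸ heV
      · intro x hx
        refine ⟨?_, hpw.1 x hx⟩
        rw [← List.mem_reverse, hcase]
        exact List.mem_cons_of_mem _ hx
      · exact hpw.2
      · intro x hx hxe
        have : x ∈ e :: rest := by rw [← hcase, List.mem_reverse]; exact hx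
        rcases List.mem_cons.1 this with h | h
        · omega
        · exact h
    rw [GoodS_unique shape R e _ _ hA hB]
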